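-- pv_equiv track=rewrite | github.com/madorjan2/math_is_fun_games_automation | WIP/puzzle-nonogram/utils.py | create_str_list_from
-- ===== SOURCE A (Python) =====
-- def create_str_list_from(task_list, longest):
-- 	str_task_data = []
-- 	for task in task_list:
-- 		str_task = ''
-- 		for i in range(longest):
-- 			if len(task) < longest - i:
-- 				str_task += '      '
-- 			else:
-- 				str_number = str(task[i - (longest - len(task))])
-- 				str_task += ' ' * (len(str_number) < 3) + str_number + ' ' * (len(str_number) == 1) + '   '
-- 		str_task_data.append(str_task[:-3])
-- 	return str_task_data
-- ===== SOURCE B (Python) =====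
-- def create_str_list_from(task_list, longest):
--     def body(n):
--         s = str(n)
--         return ' ' * (len(s) < 3) + s + ' ' * (len(s) == 1)
--
--     out = []
--     for task in task_list:
--         # scan the task from its right end, collecting displayed bodies back-to-front
--         bodies = []
--         i = len(task)
--         m = longest
--         while m > 0 and i > 0:
--             i -= 1
--             m -= 1
--             bodies.append(body(task[i]))
--         # whatever of the width is left over becomes leading padding
--         out.append('   '.join(['   '] * m + bodies[::-1]))
--     return out
-- ===== Notes on version B (the rewrite author's own statement) =====
-- stated objective: alternative
-- what changed: B replaces A's forward range(longest) index loop that appends fixed 6-char cells and trims 3 trailing chars by a backward scan consuming the task from its right end into a reversed list of 3-char-suffix-free bodies, with the leftover width becoming padding and the bodies joined with a ' ' separator, so no per-column branch, trimming or index-offset arithmetic occurs.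
import Mathlib
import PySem

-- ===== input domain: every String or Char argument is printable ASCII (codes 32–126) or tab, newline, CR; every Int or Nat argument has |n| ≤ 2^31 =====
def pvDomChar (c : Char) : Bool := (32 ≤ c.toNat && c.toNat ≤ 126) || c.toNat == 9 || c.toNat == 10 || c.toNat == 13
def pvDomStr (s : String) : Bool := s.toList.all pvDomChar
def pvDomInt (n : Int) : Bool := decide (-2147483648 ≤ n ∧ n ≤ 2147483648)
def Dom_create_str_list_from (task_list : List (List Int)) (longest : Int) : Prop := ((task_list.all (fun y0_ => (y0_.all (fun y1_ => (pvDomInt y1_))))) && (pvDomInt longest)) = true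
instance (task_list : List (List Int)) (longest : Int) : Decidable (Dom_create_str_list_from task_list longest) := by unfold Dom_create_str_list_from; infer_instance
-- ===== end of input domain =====

-- B replaces A's forward range(longest) index loop (6-char cells, trim last 3) by a backward
-- scan consuming the task from its right end, whose reversed 3-char-suffix-free bodies, after
-- the leftover width becomes padding, are joined with a '   ' separator; objective: alternative.
-- Strings are built on the List Char side (PySem convention) and packed with String.ofList.

-- ===== PORT A =====
-- str_task accumulator of A's inner 'for i in range(longest)' loop, on List Char
def pvStrTaskA (task : List Int) (longest : Int) : List Char :=
  (PySem.List.pyRange 0 longest 1).foldl (fun acc i =>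
    if (task.length : Int) < longest - i then
      acc ++ "      ".toList
    else
      match PySem.List.pyGet? task (i - (longest - (task.length : Int))) with
      | some v =>
        let s := PySem.Int.toChars v
        acc ++ (if s.length < 3 then [' '] else []) ++ s
            ++ (if s.length = 1 then [' '] else []) ++ "   ".toList
      | none => acc) []  -- unreachable: the index is always in range in the else branch

def create_str_list_from (task_list : List (List Int)) (longest : Int) : List String :=
  task_list.map (fun task =>
    String.ofList (PySem.List.slice (pvStrTaskA task longest) none (some (-3))))  -- str_task[:-3]

-- ===== PORT B =====
-- body(n) of Source B: the formatted number without the trailing '   '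
def pvBody (n : Int) : List Char :=
  let s := PySem.Int.toChars n
  (if s.length < 3 then [' '] else []) ++ s ++ (if s.length = 1 then [' '] else [])

-- the 'while m > 0 and i > 0' scan of Source B, from the right end of the task
def pvRowLoop (task : List Int) (i m : Int) (bodies : List (List Char)) :
    (List (List Char)) × Int :=
  if hgo : 0 < m ∧ 0 < i then
    match PySem.List.pyGet? task (i - 1) with
    | some v => pvRowLoop task (i - 1) (m - 1) (bodies ++ [pvBody v])
    | none => (bodies, m)   -- unreachable: 0 < i ≤ len(task) throughout
  else (bodies, m)
termination_by i.toNat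
decreasing_by omega

def create_str_list_from_alt (task_list : List (List Int)) (longest : Int) : List String :=
  task_list.map (fun task =>
    let r := pvRowLoop task (task.length : Int) longest []
    -- '   '.join(['   '] * m + bodies[::-1]); [::-1] is reverse (PySem.List.slice?_none_none_neg_one)
    String.ofList (PySem.Chars.join "   ".toList
      (List.replicate r.2.toNat "   ".toList ++ r.1.reverse)))

-- ===== PRECONDITION & SPEC =====
def Spec_create_str_list_from (task_list : List (List Int)) (longest : Int) (out : List String) : Prop := out = create_str_list_from_alt task_list longest
instance (task_list : List (List Int)) (longest : Int) (out : List String) : Decidable (Spec_create_str_list_from task_list longest out) := by unfold Spec_create_str_list_from; infer_instance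

-- ===== CLAIM (what is proved, stated in full; the proofs are below) =====
def Claim_equal_create_str_list_from : Prop := ∀ (task_list : List (List Int)) (longest : Int), Dom_create_str_list_from task_list longest → Spec_create_str_list_from task_list longest (create_str_list_from task_list longest)

-- ===== LEMMAS AND PROOFS =====

def pvSep : List Char := "   ".toList

-- the canonical body list of one row (proof-only helper)
def pvBodies (task : List Int) (N : Nat) : List (List Char) :=
  List.replicate (N - min task.length N) pvSep
    ++ (task.drop (task.length - min task.length N)).map pvBody

-- the per-step contribution of A's inner loop, as a pure function of i
def pvF (task : List Int) (L : Int) (i : Int) : List Char :=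
  if (task.length : Int) < L - i then "      ".toList
  else
    match PySem.List.pyGet? task (i - (L - (task.length : Int))) with
    | some v => pvBody v ++ pvSep
    | none => []

theorem pv_foldl_flat {α β : Type} (l : List α) (f : α → List β) (a : List β) :
    l.foldl (fun acc i => acc ++ f i) a = a ++ l.flatMap f := by
  induction l generalizing a with
  | nil => simp
  | cons x xs ih => simp [List.foldl_cons, ih, List.append_assoc]

theorem pv_strTaskA_flat (task : List Int) (L : Int) :
    pvStrTaskA task L = (PySem.List.pyRange 0 L 1).flatMap (pvF task L) := by
  have hbody : (fun (acc : List Char) (i : Int) =>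
      if (task.length : Int) < L - i then
        acc ++ "      ".toList
      else
        match PySem.List.pyGet? task (i - (L - (task.length : Int))) with
        | some v =>
          let s := PySem.Int.toChars v
          acc ++ (if s.length < 3 then [' '] else []) ++ s
              ++ (if s.length = 1 then [' '] else []) ++ "   ".toList
        | none => acc)
      = (fun (acc : List Char) (i : Int) => acc ++ pvF task L i) := by
    funext acc i
    unfold pvF pvBody pvSep
    split
    · rfl
    · cases PySem.List.pyGet? task (i - (L - (task.length : Int))) with
      | some v => simp [List.append_assoc]
      | none => simp
  unfold pvStrTaskA
  rw [hbody, pv_foldl_flat, List.nil_append]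

-- index always hits: pyGet? at an in-range non-negative index
theorem pv_pyGet?_nat (task : List Int) (k : Nat) (h : k < task.length) :
    PySem.List.pyGet? task (k : Int) = some task[k] := by
  simp [PySem.List.pyGet?, PySem.List.pyIdx?, h]

-- A's inner loop produces exactly the cells 'body ++ sep' of the canonical body list
theorem pv_strTaskA_eq (task : List Int) (N : Nat) :
    pvStrTaskA task (N : Int) = ((pvBodies task N).map (· ++ pvSep)).flatten := by
  rw [pv_strTaskA_flat, PySem.List.pyRange_one, List.flatMap_map, List.flatMap_def]
  simp only [sub_zero, zero_add, Int.toNat_natCast]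
  refine congrArg List.flatten (List.ext_getElem ?_ ?_)
  · simp only [List.length_map, List.length_range, pvBodies, List.length_append,
      List.length_replicate, List.length_drop]
    omega
  · intro k h1 h2
    simp only [List.length_map, List.length_range] at h1
    simp only [List.getElem_map, List.getElem_range]
    unfold pvBodies
    rw [List.getElem_append]
    split
    case _ hlt =>
      simp only [List.length_replicate] at hlt
      rw [List.getElem_replicate]
      unfold pvF
      rw [if_pos (by omega)]
      decide
    case _ hge =>
      simp only [List.length_replicate] at hge
      rw [List.getElem_map, List.getElem_drop]
      have hcond : ¬ ((task.length : Int) < (N : Int) - (k : Int)) := by omega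
      have hj : task.length - min task.length N + (k - (N - min task.length N))
          < task.length := by omega
      have hidx : (k : Int) - ((N : Int) - (task.length : Int))
          = ((task.length - min task.length N + (k - (N - min task.length N)) : Nat) : Int) := by
        omega
      unfold pvF
      rw [if_neg hcond, hidx, pv_pyGet?_nat task _ hj]
      simp [List.length_replicate]

-- the scan collects (reversed) the bodies of the last min(k, m.toNat) task values,
-- leaving m minus that many of the width
theorem pv_rowLoop_eq (task : List Int) (k : Nat) (hk : k ≤ task.length) (m : Int)
    (bodies : List (List Char)) :
    pvRowLoop task (k : Int) m bodies
      = (bodies ++ (((task.drop (k - min k m.toNat)).take (min k m.toNat)).map pvBody).reverse,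
         m - (min k m.toNat : Nat)) := by
  induction k generalizing m bodies with
  | zero =>
    rw [pvRowLoop, dif_neg (by omega)]
    simp
  | succ n ih =>
    by_cases hm : 0 < m
    · rw [pvRowLoop, dif_pos ⟨hm, by omega⟩]
      have hidx : ((n + 1 : Nat) : Int) - 1 = ((n : Nat) : Int) := by push_cast; ring
      rw [hidx, pv_pyGet?_nat task n (by omega)]
      show pvRowLoop task ((n : Nat) : Int) (m - 1) (bodies ++ [pvBody (task[n])]) = _
      rw [ih (by omega) (m - 1)]
      have hr : min (n + 1) m.toNat = min n (m - 1).toNat + 1 := by omega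
      have hmr : m - 1 - (min n (m - 1).toNat : Nat) = m - (min (n + 1) m.toNat : Nat) := by
        omega
      have hseg : (task.drop (n + 1 - min (n + 1) m.toNat)).take (min (n + 1) m.toNat)
          = (task.drop (n - min n (m - 1).toNat)).take (min n (m - 1).toNat) ++ [task[n]] := by
        rw [hr, show n + 1 - (min n (m - 1).toNat + 1) = n - min n (m - 1).toNat by omega,
          List.take_add_one]
        congr 1
        have : (task.drop (n - min n (m - 1).toNat))[min n (m - 1).toNat]?
            = task[n]? := by
          rw [List.getElem?_drop]
          congr 1
          omega
        rw [this, List.getElem?_eq_getElem (by omega)]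
        rfl
      rw [hseg, hmr]
      simp [List.append_assoc]
    · rw [pvRowLoop, dif_neg (by omega)]
      have : min (n + 1) m.toNat = 0 := by omega
      rw [this]
      simp

-- B's row (padding ++ reversed scan) is exactly the canonical body list
theorem pv_row_eq (task : List Int) (N : Nat) :
    (List.replicate (pvRowLoop task (task.length : Int) (N : Int) []).2.toNat "   ".toList
        ++ (pvRowLoop task (task.length : Int) (N : Int) []).1.reverse)
      = pvBodies task N := by
  rw [pv_rowLoop_eq task task.length le_rfl]
  have hmin : min task.length ((N : Int)).toNat = min task.length N := by omega
  unfold pvBodies pvSep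
  rw [hmin]
  have htake : (task.drop (task.length - min task.length N)).take (min task.length N)
      = task.drop (task.length - min task.length N) := by
    apply List.take_of_length_le
    simp only [List.length_drop]
    omega
  simp [htake]
  omega

-- flatten of '(body ++ sep)' cells of a nonempty list = join with sep, plus a trailing sep
theorem pv_flatten_join (sep : List Char) (b : List Char) (bs : List (List Char)) :
    ((b :: bs).map (· ++ sep)).flatten = PySem.Chars.join sep (b :: bs) ++ sep := by
  induction bs generalizing b with
  | nil => simp [PySem.Chars.join_singleton]
  | cons c cs ih =>
    rw [PySem.Chars.join_cons_cons, List.map_cons, List.flatten_cons, ih c]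
    simp only [List.append_assoc]

-- trimming the trailing 3-char sep of the flattened cells gives the join of the bodies
theorem pv_trim_eq_join (bs : List (List Char)) :
    PySem.List.slice ((bs.map (· ++ pvSep)).flatten) none (some (-3))
      = PySem.Chars.join pvSep bs := by
  cases bs with
  | nil =>
    simp [PySem.Chars.join_nil, PySem.List.slice]
  | cons b tl =>
    rw [pv_flatten_join]
    rw [PySem.List.slice_to_neg_ofNat _ 3 (by omega)]
    have hsep : pvSep.length = 3 := by decide
    have hlen : (PySem.Chars.join pvSep (b :: tl) ++ pvSep).length
        = (PySem.Chars.join pvSep (b :: tl)).length + 3 := by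
      simp [hsep]
    rw [hlen, Nat.add_sub_cancel, List.take_left]

-- one row: A's string equals B's string
theorem pv_one_row (task : List Int) (L : Int) :
    PySem.List.slice (pvStrTaskA task L) none (some (-3))
      = PySem.Chars.join "   ".toList
          (List.replicate (pvRowLoop task (task.length : Int) L []).2.toNat "   ".toList
            ++ (pvRowLoop task (task.length : Int) L []).1.reverse) := by
  have hLN : L = ((L.toNat : Nat) : Int) ∨ L ≤ 0 := by omega
  rcases hLN with hLN | hL
  · rw [hLN, pv_strTaskA_eq, pv_row_eq, pv_trim_eq_join]
    rfl
  · have hA : pvStrTaskA task L = [] := by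
      rw [pv_strTaskA_flat, PySem.List.pyRange_one_eq_nil hL]
      rfl
    have hB : pvRowLoop task (task.length : Int) L [] = ([], L) := by
      rcases task with _ | ⟨x, xs⟩
      · rw [pvRowLoop]
        simp
      · rw [pvRowLoop, dif_neg (by omega)]
    rw [hA, hB]
    have : (L.toNat : Nat) = 0 := by omega
    simp [this, PySem.Chars.join_nil, PySem.List.slice]

-- ===== VERDICT (by name: the statement is the Claim_ definition above) =====
theorem create_str_list_from_spec : Claim_equal_create_str_list_from := by
  intro tl L _
  unfold Spec_create_str_list_from create_str_list_from create_str_list_from_alt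
  refine List.map_congr_left (fun task _ => ?_)
  rw [pv_one_row]
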